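-- pv_equiv track=rewrite | github.com/warpdotdev/docs | .agents/skills/missing_docs/scripts/audit_docs.py | search_docs_for_terms
-- ===== SOURCE A (Python) =====
-- def search_docs_for_terms(docs_text: dict[str, str], terms: list[str]) -> list[str]:
--     """Search all docs for any of the given terms. Return matching file paths."""
--     matches = []
--     for path, content in docs_text.items():
--         for term in terms:
--             if term in content:
--                 matches.append(path)
--                 break
--     return matches
-- ===== SOURCE B (Python) =====
-- def search_docs_for_terms(docs_text: dict[str, str], terms: list[str]) -> list[str]:
--     """Search all docs for any of the given terms. Return matching file paths."""
--     matched = set()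
--     for term in terms:
--         matched.update(path for path, content in docs_text.items()
--                        if path not in matched and term in content)
--     return [path for path in docs_text if path in matched]
-- ===== Notes on version B (the rewrite author's own statement) =====
-- stated objective: alternative
-- what changed: Inverted the loop nesting: instead of scanning the term list per document with a break, B makes one pass per term collecting matching paths into a set, then emits the matched paths in original document order.
import Mathlib
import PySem

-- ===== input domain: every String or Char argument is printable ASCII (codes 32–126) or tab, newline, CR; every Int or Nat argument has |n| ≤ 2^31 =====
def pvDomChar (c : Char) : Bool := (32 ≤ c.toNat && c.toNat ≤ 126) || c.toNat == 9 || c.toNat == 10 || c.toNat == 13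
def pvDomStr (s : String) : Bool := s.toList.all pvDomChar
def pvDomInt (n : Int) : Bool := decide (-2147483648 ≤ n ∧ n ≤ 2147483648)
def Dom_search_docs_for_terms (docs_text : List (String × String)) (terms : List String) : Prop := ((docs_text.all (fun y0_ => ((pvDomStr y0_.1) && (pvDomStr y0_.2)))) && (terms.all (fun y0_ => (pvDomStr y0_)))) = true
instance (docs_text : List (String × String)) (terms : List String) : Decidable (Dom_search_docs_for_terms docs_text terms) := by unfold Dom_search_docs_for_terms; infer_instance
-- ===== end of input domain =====

-- B inverts the loop nesting: one pass per term collecting matching paths into a set,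
-- then the matched paths are emitted in original document order (alternative decomposition, same cost).


-- ===== PORT A =====
-- inner 'for term in terms: if term in content: …; break' — the loop stops at the first matching term
def pvHasTerm : List String → String → Bool
  | [], _ => false
  | t :: rest, content => if PySem.Str.isIn t content then true else pvHasTerm rest content

def search_docs_for_terms (docs_text : List (String × String)) (terms : List String) : List String :=
  (PySem.Dict.ofList docs_text).items.foldl
    (fun acc pc => if pvHasTerm terms pc.2 then acc ++ [pc.1] else acc) []

-- ===== PORT B =====
-- matched = set()
-- for term in terms: matched.update(path for path, content in docs_text.items()
--                                   if path not in matched and term in content)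
-- return [path for path in docs_text if path in matched]
def search_docs_for_terms_alt (docs_text : List (String × String)) (terms : List String) : List String :=
  (PySem.Dict.ofList docs_text).keys.filter (fun path =>
    PySem.Set.contains
      (terms.foldl (fun s term =>
        PySem.Set.update s (((PySem.Dict.ofList docs_text).items.filter
          (fun pc => !PySem.Set.contains s pc.1 && PySem.Str.isIn term pc.2)).map Prod.fst))
        PySem.Set.empty) path)

-- ===== PRECONDITION & SPEC =====
def Spec_search_docs_for_terms (docs_text : List (String × String)) (terms : List String) (out : List String) : Prop := out = search_docs_for_terms_alt docs_text terms
instance (docs_text : List (String × String)) (terms : List String) (out : List String) : Decidable (Spec_search_docs_for_terms docs_text terms out) := by unfold Spec_search_docs_for_terms; infer_instance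

-- ===== CLAIM (what is proved, stated in full; the proofs are below) =====
def Claim_equal_search_docs_for_terms : Prop := ∀ (docs_text : List (String × String)) (terms : List String), Dom_search_docs_for_terms docs_text terms → Spec_search_docs_for_terms docs_text terms (search_docs_for_terms docs_text terms)

-- ===== LEMMAS AND PROOFS =====

-- membership in B's accumulated set of matched paths
theorem mem_matched (items : List (String × String)) (terms : List String)
    (s : PySem.Set String) (x : String) :
    x ∈ terms.foldl (fun s term =>
        PySem.Set.update s ((items.filter
          (fun pc => !PySem.Set.contains s pc.1 && PySem.Str.isIn term pc.2)).map Prod.fst)) s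
      ↔ x ∈ s ∨ ∃ pc ∈ items, pvHasTerm terms pc.2 = true ∧ x = pc.1 := by
  induction terms generalizing s with
  | nil => simp [pvHasTerm]
  | cons t rest ih =>
    simp only [List.foldl_cons, ih, PySem.Set.mem_update, List.mem_map, List.mem_filter,
      Bool.and_eq_true, Bool.not_eq_true', pvHasTerm]
    constructor
    · rintro ((hs | ⟨pc, ⟨hpc, _, hin⟩, rfl⟩) | ⟨pc, hpc, hh, rfl⟩)
      · exact Or.inl hs
      · exact Or.inr ⟨pc, hpc, by simp only [PySem.Str.isIn_eq] at hin; simp [hin], rfl⟩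
      · refine Or.inr ⟨pc, hpc, ?_, rfl⟩
        by_cases h : PySem.Str.isIn t pc.2 = true
        · rw [if_pos h]
        · rw [if_neg h]; exact hh
    · rintro (hs | ⟨pc, hpc, hh, rfl⟩)
      · exact Or.inl (Or.inl hs)
      · by_cases hmem : pc.1 ∈ s
        · exact Or.inl (Or.inl hmem)
        · by_cases h : PySem.Str.isIn t pc.2 = true
          · refine Or.inl (Or.inr ⟨pc, ⟨hpc, ?_, h⟩, rfl⟩)
            simpa [PySem.Set.contains_iff] using hmem
          · rw [if_neg h] at hh
            exact Or.inr ⟨pc, hpc, hh, rfl⟩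

-- ===== VERDICT (by name: the statement is the Claim_ definition above) =====
theorem search_docs_for_terms_spec : Claim_equal_search_docs_for_terms := by
  intro docs_text terms _
  unfold Spec_search_docs_for_terms search_docs_for_terms search_docs_for_terms_alt
  set items := (PySem.Dict.ofList docs_text).items with hitems
  have hkeys : (PySem.Dict.ofList docs_text).keys = items.map Prod.fst := rfl
  have hnd : (items.map Prod.fst).Nodup := by
    rw [← hkeys]; exact PySem.Dict.nodup_keys_ofList docs_text
  rw [PySem.List.foldl_append_if (fun pc => pvHasTerm terms pc.2) Prod.fst items [], hkeys,
    List.filter_map, List.nil_append]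
  congr 1
  apply List.filter_congr
  intro pc hpc
  have hcong : PySem.Set.contains
      (terms.foldl (fun s term =>
        PySem.Set.update s ((items.filter
          (fun pc => !PySem.Set.contains s pc.1 && PySem.Str.isIn term pc.2)).map Prod.fst))
        PySem.Set.empty) pc.1 = true ↔ pvHasTerm terms pc.2 = true := by
    rw [PySem.Set.contains_iff, mem_matched]
    constructor
    · rintro (hs | ⟨pc', hpc', hh, heq⟩)
      · simp [PySem.Set.empty] at hs
      · have : pc = pc' := List.inj_on_of_nodup_map hnd hpc hpc' heq
        rw [this]; exact hh
    · intro hh; exact Or.inr ⟨pc, hpc, hh, rfl⟩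
  simp only [Function.comp_apply]
  rw [Bool.eq_iff_iff]
  exact hcong.symm
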